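-- pv_equiv track=rewrite | github.com/ncbi/GNorm2 | src_python/SpeAss/SA_Pubtator_Conll.py | get_one_entity
-- ===== SOURCE A (Python) =====
-- REL_ENT={'arg1':'Species',
--          'arg2':'Gene'}
--
-- def get_one_entity(nest_list,cur_ent,rel_entity2_id):
--     max_len=0
--     max_entity=[]
--     final_entity=[]
--     for i in range(0, len(nest_list)):
--         if nest_list[i][1]==cur_ent:#current entity
--             final_entity=[]
--             max_entity=nest_list[i]
--             final_entity.append(nest_list[i])
--             return(final_entity)
--         if nest_list[i][1] in rel_entity2_id: #invole rel
--             final_entity.append(nest_list[i])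
--             continue
--         length=int(nest_list[i][4])-int(nest_list[i][3])
--         if max_entity==[]: #first entity
--             max_len=length
--             max_entity=nest_list[i]
--         else:
--             if length>max_len:
--                 if max_entity[2]==REL_ENT['arg1']:
--                     max_len=length
--                     max_entity=nest_list[i]
--                 else:
--                     if nest_list[i][2]==REL_ENT['arg2'] and max_entity[1] not in rel_entity2_id:
--                         max_len=length
--                         max_entity=nest_list[i]
--
--             else:
--                 if nest_list[i][1] in rel_entity2_id:
--                     max_len=length
--                     max_entity=nest_list[i]
--                 elif max_entity[2]==REL_ENT['arg1'] and nest_list[i][2]==REL_ENT['arg2']: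
--                     max_len=length
--                     max_entity=nest_list[i]
--     if final_entity==[]:
--         final_entity.append(max_entity)
--     return final_entity
-- ===== SOURCE B (Python) =====
-- REL_ENT={'arg1':'Species',
--          'arg2':'Gene'}
--
-- def get_one_entity(nest_list, cur_ent, rel_entity2_id):
--     # Phase 1: the first mention of the current entity wins outright.
--     match = next((x for x in nest_list if x[1] == cur_ent), None)
--     if match is not None:
--         return [match]
--     # Phase 2: otherwise every relation-involved mention, in order.
--     rels = [x for x in nest_list if x[1] in rel_entity2_id]
--     if rels:
--         return rels
--     # Phase 3: no relation mentions at all -> stateful longest-span pick.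
--     best, max_len = [], 0
--     for x in nest_list:
--         length = int(x[4]) - int(x[3])
--         if not best:
--             best, max_len = x, length
--         elif length > max_len:
--             if best[2] == REL_ENT['arg1'] or x[2] == REL_ENT['arg2']:
--                 best, max_len = x, length
--         elif best[2] == REL_ENT['arg1'] and x[2] == REL_ENT['arg2']:
--             best, max_len = x, length
--     return [best]
-- ===== Notes on version B (the rewrite author's own statement) =====
-- stated objective: simpler
-- what changed: Replaces A's single interleaved loop (early return, rel-collection and max-tracking all mixed in one pass) by three sequential phases - find first cur_ent match, else collect rel mentions, else a plain max fold whose conditions are simplified because phase 3 can assume no element is rel-involved - so the dead 'x[1] in rel' branch and the always-true 'max_entity[1] not in rel' guard disappear.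
import Mathlib
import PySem

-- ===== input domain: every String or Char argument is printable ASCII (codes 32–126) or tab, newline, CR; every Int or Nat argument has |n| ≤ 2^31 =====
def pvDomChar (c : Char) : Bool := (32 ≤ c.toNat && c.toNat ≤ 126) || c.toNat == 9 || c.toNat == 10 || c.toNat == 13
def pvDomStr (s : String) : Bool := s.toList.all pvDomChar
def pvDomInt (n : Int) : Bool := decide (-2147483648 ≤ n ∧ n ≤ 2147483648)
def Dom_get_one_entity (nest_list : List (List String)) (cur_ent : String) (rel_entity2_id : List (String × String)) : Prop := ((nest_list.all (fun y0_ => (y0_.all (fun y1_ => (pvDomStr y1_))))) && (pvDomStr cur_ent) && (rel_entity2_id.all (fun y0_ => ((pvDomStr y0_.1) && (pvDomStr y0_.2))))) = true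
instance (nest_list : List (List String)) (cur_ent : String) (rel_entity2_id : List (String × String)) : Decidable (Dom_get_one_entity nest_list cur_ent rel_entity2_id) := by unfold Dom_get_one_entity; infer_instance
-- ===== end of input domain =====

-- B replaces A's single interleaved loop by three sequential phases (first match / rel
-- collection / simplified max fold); objective: simpler. Return-value equivalence only.

-- ===== PORT A =====
-- REL_ENT = {'arg1':'Species','arg2':'Gene'}
def pvREL_ENT : List (String × String) := [("arg1", "Species"), ("arg2", "Gene")]

-- x[1] as Python (IndexError → outside Pre_; totalized with "")
def pvKey (x : List String) (i : Int) : String := (PySem.List.pyGet? x i).getD ""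

-- 'k in rel_entity2_id' (dict key membership)
def pvMemKeys (rel : List (String × String)) (k : String) : Bool := rel.any (fun p => p.1 == k)

-- int(x[i]) totalized with 0 (ValueError/IndexError → outside Pre_)
def pvIntAt (x : List String) (i : Int) : Int := (((PySem.List.pyGet? x i).bind PySem.Int.ofStr?).getD 0)

-- the for-loop of A, state = (max_len, max_entity, final_entity)
def pvA_loop (cur_ent : String) (rel : List (String × String)) :
    List (List String) → Int → List String → List (List String) → List (List String)
  | [], _max_len, max_entity, final_entity =>
      if final_entity = [] then [max_entity] else final_entity
  | x :: rest, max_len, max_entity, final_entity =>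
      if pvKey x 1 = cur_ent then [x]
      else if pvMemKeys rel (pvKey x 1) then
        pvA_loop cur_ent rel rest max_len max_entity (final_entity ++ [x])
      else
        let length := pvIntAt x 4 - pvIntAt x 3
        if max_entity = ([] : List String) then
          pvA_loop cur_ent rel rest length x final_entity
        else
          if length > max_len then
            if pvKey max_entity 2 = (PySem.Dict.mk pvREL_ENT).getD "arg1" "" then
              pvA_loop cur_ent rel rest length x final_entity
            else
              if pvKey x 2 = (PySem.Dict.mk pvREL_ENT).getD "arg2" "" ∧
                 ¬ (pvMemKeys rel (pvKey max_entity 1) = true) then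
                pvA_loop cur_ent rel rest length x final_entity
              else
                pvA_loop cur_ent rel rest max_len max_entity final_entity
          else
            if pvMemKeys rel (pvKey x 1) then
              pvA_loop cur_ent rel rest length x final_entity
            else
              if pvKey max_entity 2 = (PySem.Dict.mk pvREL_ENT).getD "arg1" "" ∧
                 pvKey x 2 = (PySem.Dict.mk pvREL_ENT).getD "arg2" "" then
                pvA_loop cur_ent rel rest length x final_entity
              else
                pvA_loop cur_ent rel rest max_len max_entity final_entity

def get_one_entity (nest_list : List (List String)) (cur_ent : String) (rel_entity2_id : List (String × String)) : List (List String) :=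
  pvA_loop cur_ent rel_entity2_id nest_list 0 [] []

-- ===== PORT B =====
-- one step of B's phase-3 fold, state = (best, max_len)
def pvB_step (b : List String × Int) (x : List String) : List String × Int :=
  let length := pvIntAt x 4 - pvIntAt x 3
  if b.1 = ([] : List String) then (x, length)
  else if length > b.2 then
    if pvKey b.1 2 = (PySem.Dict.mk pvREL_ENT).getD "arg1" "" ∨
       pvKey x 2 = (PySem.Dict.mk pvREL_ENT).getD "arg2" "" then (x, length) else b
  else
    if pvKey b.1 2 = (PySem.Dict.mk pvREL_ENT).getD "arg1" "" ∧
       pvKey x 2 = (PySem.Dict.mk pvREL_ENT).getD "arg2" "" then (x, length) else b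

def get_one_entity_alt (nest_list : List (List String)) (cur_ent : String) (rel_entity2_id : List (String × String)) : List (List String) :=
  match nest_list.find? (fun x => pvKey x 1 == cur_ent) with
  | some x => [x]
  | none =>
    let rels := nest_list.filter (fun x => pvMemKeys rel_entity2_id (pvKey x 1))
    if rels ≠ [] then rels
    else [(nest_list.foldl pvB_step (([] : List String), (0 : Int))).1]

-- ===== PRECONDITION & SPEC =====
-- Pre_ excludes exactly the inputs where Python A raises: before the first element whose
-- [1] equals cur_ent, every element must have an index 1 and, unless its [1] is a rel key,
-- int-parseable fields at indices 3 and 4 (IndexError / ValueError otherwise).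
def pvOkElem (cur_ent : String) (rel : List (String × String)) (x : List String) : Bool :=
  match PySem.List.pyGet? x 1 with
  | none => false
  | some s =>
      s != cur_ent &&
      (pvMemKeys rel s ||
        (((PySem.List.pyGet? x 4).bind PySem.Int.ofStr?).isSome &&
         ((PySem.List.pyGet? x 3).bind PySem.Int.ofStr?).isSome))

def Pre_get_one_entity (nest_list : List (List String)) (cur_ent : String) (rel_entity2_id : List (String × String)) : Prop :=
  ((nest_list.dropWhile (pvOkElem cur_ent rel_entity2_id)).head?.all
    (fun y => PySem.List.pyGet? y 1 == some cur_ent)) = true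
instance (nest_list : List (List String)) (cur_ent : String) (rel_entity2_id : List (String × String)) : Decidable (Pre_get_one_entity nest_list cur_ent rel_entity2_id) := by unfold Pre_get_one_entity; infer_instance

def pvWitness_get_one_entity : List (List String) × String × (List (String × String)) :=
  ([["0", "sp", "Species", "1", "3"], ["1", "g", "Gene", "2", "9"]], "zz", [("sp", "S1")])

def Spec_get_one_entity (nest_list : List (List String)) (cur_ent : String) (rel_entity2_id : List (String × String)) (out : List (List String)) : Prop := out = get_one_entity_alt nest_list cur_ent rel_entity2_id
instance (nest_list : List (List String)) (cur_ent : String) (rel_entity2_id : List (String × String)) (out : List (List String)) : Decidable (Spec_get_one_entity nest_list cur_ent rel_entity2_id out) := by unfold Spec_get_one_entity; infer_instance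

-- ===== CLAIM (what is proved, stated in full; the proofs are below) =====
def Claim_equal_get_one_entity : Prop := ∀ (nest_list : List (List String)) (cur_ent : String) (rel_entity2_id : List (String × String)), Dom_get_one_entity nest_list cur_ent rel_entity2_id → Pre_get_one_entity nest_list cur_ent rel_entity2_id → Spec_get_one_entity nest_list cur_ent rel_entity2_id (get_one_entity nest_list cur_ent rel_entity2_id)

-- ===== LEMMAS AND PROOFS =====

-- B-side meaning of A's loop, with explicit accumulators
def pvBsem (cur_ent : String) (rel : List (String × String)) (xs : List (List String))
    (ml : Int) (me : List String) (fin : List (List String)) : List (List String) :=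
  match xs.find? (fun x => pvKey x 1 == cur_ent) with
  | some x => [x]
  | none =>
    let rels := fin ++ xs.filter (fun x => pvMemKeys rel (pvKey x 1))
    if rels ≠ [] then rels
    else [(xs.foldl pvB_step (me, ml)).1]

theorem pvA_loop_eq_pvBsem (cur_ent : String) (rel : List (String × String)) :
    ∀ (xs : List (List String)) (ml : Int) (me : List String) (fin : List (List String)),
      (me = [] ∨ pvMemKeys rel (pvKey me 1) = false) →
      pvA_loop cur_ent rel xs ml me fin = pvBsem cur_ent rel xs ml me fin := by
  intro xs
  induction xs with
  | nil =>
    intro ml me fin _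
    by_cases h : fin = ([] : List (List String)) <;> simp [pvA_loop, pvBsem, h]
  | cons x rest ih =>
    intro ml me fin hme
    by_cases hcur : pvKey x 1 = cur_ent
    · simp [pvA_loop, pvBsem, hcur, List.find?]
    · have hcur' : (pvKey x 1 == cur_ent) = false := by simpa using hcur
      by_cases hrel : pvMemKeys rel (pvKey x 1) = true
      · have : pvA_loop cur_ent rel (x :: rest) ml me fin
            = pvA_loop cur_ent rel rest ml me (fin ++ [x]) := by
          simp [pvA_loop, hcur, hrel]
        rw [this, ih ml me (fin ++ [x]) hme]
        simp [pvBsem, List.find?, hcur', hrel]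
      · -- non-rel, non-cur element: A's update equals pvB_step
        have hrel' : pvMemKeys rel (pvKey x 1) = false := by
          simpa using hrel
        have hstep : pvA_loop cur_ent rel (x :: rest) ml me fin
            = pvA_loop cur_ent rel rest (pvB_step (me, ml) x).2 (pvB_step (me, ml) x).1 fin := by
          by_cases hnil : me = ([] : List String)
          · simp [pvA_loop, pvB_step, hcur, hrel', hnil]
          · rcases hme with hme | hme
            · exact absurd hme hnil
            · by_cases hlen : pvIntAt x 4 - pvIntAt x 3 > ml
              · by_cases hsp : pvKey me 2 = (PySem.Dict.mk pvREL_ENT).getD "arg1" ""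
                · simp [pvA_loop, pvB_step, hcur, hrel', hnil, hlen, hsp]
                · by_cases hg : pvKey x 2 = (PySem.Dict.mk pvREL_ENT).getD "arg2" ""
                  · simp [pvA_loop, pvB_step, hcur, hrel', hnil, hlen, hsp, hg, hme]
                  · simp [pvA_loop, pvB_step, hcur, hrel', hnil, hlen, hsp, hg]
              · by_cases hsp : pvKey me 2 = (PySem.Dict.mk pvREL_ENT).getD "arg1" ""
                · by_cases hg : pvKey x 2 = (PySem.Dict.mk pvREL_ENT).getD "arg2" ""
                  · simp [pvA_loop, pvB_step, hcur, hrel', hnil, hlen, hsp, hg]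
                  · simp [pvA_loop, pvB_step, hcur, hrel', hnil, hlen, hsp, hg]
                · simp [pvA_loop, pvB_step, hcur, hrel', hnil, hlen, hsp]
        have hinv : (pvB_step (me, ml) x).1 = [] ∨
            pvMemKeys rel (pvKey (pvB_step (me, ml) x).1 1) = false := by
          unfold pvB_step
          simp only
          split_ifs <;> first
            | exact Or.inr hrel'
            | exact hme
        rw [hstep, ih _ _ fin hinv]
        simp [pvBsem, List.find?, hcur', hrel', List.foldl_cons]

-- ===== VERDICT (by name: the statement is the Claim_ definition above) =====
theorem get_one_entity_spec : Claim_equal_get_one_entity := by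
  intro nest_list cur_ent rel _ _
  unfold Spec_get_one_entity get_one_entity
  rw [pvA_loop_eq_pvBsem cur_ent rel nest_list 0 [] [] (Or.inl rfl)]
  simp only [pvBsem, get_one_entity_alt, List.nil_append]
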